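-- pv_equiv track=rewrite | github.com/shevdan/Algo-DataStructures-sem8 | sem8/task9.py | solve
-- ===== SOURCE A (Python) =====
-- def solve(num_projects, curr_level, increase_lst, min_lvl_lst):
--
--     new_lst = [[increase_lst[i], min_lvl_lst[i]] for i in range(len(increase_lst))]
--
--     new_lst = sorted(new_lst, key=lambda x: x[0], reverse=True)
--     i = 0
--     while(num_projects > 0):
--         try:
--             if (curr_level >= new_lst[i][1]):
--                 num_projects -= 1
--                 curr_level += new_lst[i][0]
--                 new_lst.remove(new_lst[i])
--                 i = -1
--         except:
--             i = -1
--         i += 1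
--         if i == len(new_lst):
--             break
--     return curr_level
-- ===== SOURCE B (Python) =====
-- def solve(num_projects, curr_level, increase_lst, min_lvl_lst):
--     remaining = list(zip(increase_lst, min_lvl_lst))
--     while num_projects > 0:
--         best = None  # (index, increase) of the best affordable project seen so far
--         for j, (inc, req) in enumerate(remaining):
--             if curr_level >= req and (best is None or inc > best[1]):
--                 best = (j, inc)
--         if best is None:
--             break
--         inc, _ = remaining.pop(best[0])
--         curr_level += inc
--         num_projects -= 1
--     return curr_level
-- ===== Notes on version B (the rewrite author's own statement) =====
-- stated objective: alternative
-- what changed: Replaced A's sort-descending-then-rescan-from-index-0 loop with try/except control flow and remove-by-value by a direct repeated argmax scan: each round one pass over the unsorted remaining projects picks the affordable project of maximal increase (earliest on ties) and pops it by index.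
import Mathlib
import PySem

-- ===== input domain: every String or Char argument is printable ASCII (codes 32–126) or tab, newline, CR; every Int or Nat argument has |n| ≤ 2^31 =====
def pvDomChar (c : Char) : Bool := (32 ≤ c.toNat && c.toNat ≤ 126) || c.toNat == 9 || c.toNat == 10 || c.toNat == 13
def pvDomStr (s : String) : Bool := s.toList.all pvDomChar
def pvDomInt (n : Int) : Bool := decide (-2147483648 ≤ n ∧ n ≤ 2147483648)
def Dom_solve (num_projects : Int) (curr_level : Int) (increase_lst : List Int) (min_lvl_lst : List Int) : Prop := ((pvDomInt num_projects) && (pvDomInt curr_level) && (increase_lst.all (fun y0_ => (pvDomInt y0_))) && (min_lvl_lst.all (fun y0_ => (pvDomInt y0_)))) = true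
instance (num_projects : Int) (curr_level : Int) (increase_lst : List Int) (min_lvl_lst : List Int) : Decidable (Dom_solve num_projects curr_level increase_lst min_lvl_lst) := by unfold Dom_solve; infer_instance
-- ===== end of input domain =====

-- B replaces A's sort-descending + rescan-from-0 + remove-by-value loop by a repeated
-- single-pass argmax scan over the unsorted remaining projects (alternative algorithm, same cost).


-- ===== PORT A =====
-- The while loop of A, scanning the reverse-sorted list from index i.
def solveLoopA (num_projects curr_level : Int) (new_lst : List (Int × Int)) (i : Nat) : Int :=
  if num_projects > 0 then
    match h : PySem.List.pyGet? new_lst (i : Int) with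
    | none => curr_level
      -- except: i = -1; i += 1 → 0; 'i == len(new_lst)' breaks (reachable only with new_lst = [])
    | some p =>
      if curr_level ≥ p.2 then
        match h2 : PySem.List.remove? new_lst p with
        | none => curr_level  -- unreachable: p ∈ new_lst, so list.remove cannot raise
        | some lst' =>
          if 0 = lst'.length then curr_level + p.1  -- i = -1; i += 1 → 0 = len → break
          else solveLoopA (num_projects - 1) (curr_level + p.1) lst' 0
      else
        if i + 1 = new_lst.length then curr_level
        else solveLoopA num_projects curr_level new_lst (i + 1)
  else curr_level
termination_by (new_lst.length, new_lst.length - i)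
decreasing_by
  · have hp := PySem.List.mem_of_pyGet?_eq_some new_lst h
    rw [PySem.List.remove?_eq_some_erase new_lst p hp] at h2
    have hlen : lst'.length < new_lst.length := by
      cases h2
      rw [List.length_erase_of_mem hp]
      have := List.length_pos_of_mem hp
      omega
    exact Prod.Lex.left _ _ hlen
  · rw [PySem.List.pyGet?_natCast] at h
    have hi : i < new_lst.length := by
      by_contra hn
      rw [List.getElem?_eq_none (by omega)] at h
      simp at h
    exact Prod.Lex.right _ (by omega)

def solve (num_projects : Int) (curr_level : Int) (increase_lst : List Int) (min_lvl_lst : List Int) : Int :=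
  -- [[increase_lst[i], min_lvl_lst[i]] for i in range(len(increase_lst))]
  -- (indices are in range for min_lvl_lst exactly under Pre_solve; Python raises IndexError otherwise)
  let new_lst : List (Int × Int) := (List.range increase_lst.length).map
    (fun (i : Nat) => (PySem.List.pyGetD increase_lst (i : Int) 0, PySem.List.pyGetD min_lvl_lst (i : Int) 0))
  let new_lst2 := PySem.List.sorted new_lst (fun x => x.1) true
  solveLoopA num_projects curr_level new_lst2 0

-- ===== PORT B =====
-- the inner for-loop of B: best = None; for j, (inc, req) in enumerate(remaining): …
def solveFindBest (curr_level : Int) (remaining : List (Int × Int)) : Option (Int × Int) :=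
  (PySem.List.enumerate remaining).foldl
    (fun best jp =>
      if curr_level ≥ jp.2.2 then
        match best with
        | none => some (jp.1, jp.2.1)
        | some b => if b.2 < jp.2.1 then some (jp.1, jp.2.1) else best
      else best)
    none

def solveLoopB (num_projects curr_level : Int) (remaining : List (Int × Int)) : Int :=
  if num_projects > 0 then
    match solveFindBest curr_level remaining with
    | none => curr_level
    | some b =>
      match h : PySem.List.pop? remaining b.1 with
      | none => curr_level  -- unreachable: best carries a valid index
      | some pr => solveLoopB (num_projects - 1) (curr_level + pr.1.1) pr.2
  else curr_level
termination_by remaining.length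
decreasing_by
  have := PySem.List.length_of_pop?_eq_some remaining h
  omega

def solve_alt (num_projects : Int) (curr_level : Int) (increase_lst : List Int) (min_lvl_lst : List Int) : Int :=
  solveLoopB num_projects curr_level (increase_lst.zip min_lvl_lst)

-- ===== PRECONDITION & SPEC =====
-- Pre_ excludes exactly the inputs where A raises IndexError: a min-level list shorter than the increase list.
def Pre_solve (num_projects : Int) (curr_level : Int) (increase_lst : List Int) (min_lvl_lst : List Int) : Prop :=
  increase_lst.length ≤ min_lvl_lst.length
instance (num_projects : Int) (curr_level : Int) (increase_lst : List Int) (min_lvl_lst : List Int) : Decidable (Pre_solve num_projects curr_level increase_lst min_lvl_lst) := by unfold Pre_solve; infer_instance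

def pvWitness_solve : Int × Int × List Int × List Int := (2, 0, [3, 1], [0, 2])

def Spec_solve (num_projects : Int) (curr_level : Int) (increase_lst : List Int) (min_lvl_lst : List Int) (out : Int) : Prop := out = solve_alt num_projects curr_level increase_lst min_lvl_lst
instance (num_projects : Int) (curr_level : Int) (increase_lst : List Int) (min_lvl_lst : List Int) (out : Int) : Decidable (Spec_solve num_projects curr_level increase_lst min_lvl_lst out) := by unfold Spec_solve; infer_instance

-- ===== CLAIM (what is proved, stated in full; the proofs are below) =====
def Claim_equal_solve : Prop := ∀ (num_projects : Int) (curr_level : Int) (increase_lst : List Int) (min_lvl_lst : List Int), Dom_solve num_projects curr_level increase_lst min_lvl_lst → Pre_solve num_projects curr_level increase_lst min_lvl_lst → Spec_solve num_projects curr_level increase_lst min_lvl_lst (solve num_projects curr_level increase_lst min_lvl_lst)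

-- ===== LEMMAS AND PROOFS =====

-- proof-side abbreviations for A's stable insertion sort (descending by first component)
def pvIns (x : Int × Int) (s : List (Int × Int)) : List (Int × Int) :=
  PySem.List.insertBy (fun a b => decide (b.1 < a.1)) x s

def pvSort (l : List (Int × Int)) : List (Int × Int) :=
  PySem.List.sorted l (fun x => x.1) true

def pvDesc (s : List (Int × Int)) : Prop := s.Pairwise (fun a b => b.1 ≤ a.1)

theorem pvSort_append_singleton (t : List (Int × Int)) (x : Int × Int) :
    pvSort (t ++ [x]) = pvIns x (pvSort t) := by
  unfold pvSort pvIns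
  rw [PySem.List.sorted_rev_eq_foldl_insertBy, PySem.List.sorted_rev_eq_foldl_insertBy,
    List.foldl_append]
  rfl

theorem pvSort_desc (l : List (Int × Int)) : pvDesc (pvSort l) :=
  PySem.List.sorted_pairwise_rev l (fun x => x.1)

theorem pvIns_cons (x y : Int × Int) (ys : List (Int × Int)) :
    pvIns x (y :: ys) = if y.1 < x.1 then x :: y :: ys else y :: pvIns x ys := by
  simp [pvIns, PySem.List.insertBy]

theorem pvIns_nil (x : Int × Int) : pvIns x [] = [x] := by
  simp [pvIns, PySem.List.insertBy]

theorem pvIns_erase_comm (x p : Int × Int) (s : List (Int × Int)) (hs : pvDesc s)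
    (hp : p ∈ s) : (pvIns x s).erase p = pvIns x (s.erase p) := by
  induction s with
  | nil => cases hp
  | cons y ys ih =>
    unfold pvDesc at hs
    rw [List.pairwise_cons] at hs
    rw [pvIns_cons]
    by_cases hb : y.1 < x.1
    · rw [if_pos hb]
      have hxp : x ≠ p := by
        intro hxe; subst hxe
        rcases List.mem_cons.1 hp with rfl | hp'
        · omega
        · have := hs.1 x hp'; omega
      rw [List.erase_cons_tail (by simpa using hxp)]
      by_cases hpy : p = y
      · subst hpy
        rw [List.erase_cons_head]
        cases ys with
        | nil => rw [pvIns_nil]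
        | cons z zs =>
          rw [pvIns_cons, if_pos (by have := hs.1 z (by simp); omega)]
      · rw [List.erase_cons_tail (by simpa using (Ne.symm hpy)), pvIns_cons, if_pos hb]
    · rw [if_neg hb]
      by_cases hpy : p = y
      · subst hpy
        rw [List.erase_cons_head, List.erase_cons_head]
      · have hpy' : ¬(y == p) = true := by simpa using (Ne.symm hpy)
        rw [List.erase_cons_tail hpy', List.erase_cons_tail hpy',
          ih hs.2 ((List.mem_cons.1 hp).resolve_left hpy),
          pvIns_cons, if_neg hb]

theorem pvIns_erase_self (x : Int × Int) (s : List (Int × Int)) (hx : x ∉ s) :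
    (pvIns x s).erase x = s := by
  induction s with
  | nil => rw [pvIns_nil, List.erase_cons_head]
  | cons y ys ih =>
    have hxy : x ≠ y := by intro he; exact hx (he ▸ List.mem_cons_self)
    rw [pvIns_cons]
    by_cases hb : y.1 < x.1
    · rw [if_pos hb, List.erase_cons_head]
    · rw [if_neg hb, List.erase_cons_tail (by simpa using (Ne.symm hxy)),
        ih (fun h => hx (List.mem_cons_of_mem _ h))]

theorem mem_pvSort (l : List (Int × Int)) (p : Int × Int) : p ∈ pvSort l ↔ p ∈ l :=
  PySem.List.mem_sorted l (fun x => x.1) true p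

theorem pvSort_erase (l : List (Int × Int)) (p : Int × Int) (hp : p ∈ l) :
    (pvSort l).erase p = pvSort (l.erase p) := by
  induction l using List.reverseRecOn with
  | nil => cases hp
  | append_singleton t x ih =>
    rw [pvSort_append_singleton]
    by_cases hpt : p ∈ t
    · rw [pvIns_erase_comm x p (pvSort t) (pvSort_desc t) ((mem_pvSort t p).2 hpt),
        ih hpt, List.erase_append_left _ hpt, pvSort_append_singleton]
    · have hpx : p = x := by
        rcases List.mem_append.1 hp with h' | h'
        · exact absurd h' hpt
        · simpa using h'
      subst hpx
      rw [pvIns_erase_self _ _ (fun h => hpt ((mem_pvSort t p).1 h)),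
        List.erase_append_right _ hpt, List.erase_cons_head, List.append_nil]

theorem pvIns_filter_self (x : Int × Int) (s : List (Int × Int)) (hs : pvDesc s) :
    (pvIns x s).filter (fun y => y.1 == x.1) = s.filter (fun y => y.1 == x.1) ++ [x] := by
  induction s with
  | nil => simp [pvIns_nil]
  | cons y ys ih =>
    unfold pvDesc at hs
    rw [List.pairwise_cons] at hs
    rw [pvIns_cons]
    by_cases hb : y.1 < x.1
    · rw [if_pos hb]
      have h1 : (y :: ys).filter (fun y => y.1 == x.1) = [] := by
        rw [List.filter_eq_nil_iff]
        intro z hz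
        rcases List.mem_cons.1 hz with rfl | hz'
        · simp; omega
        · have := hs.1 z hz'; simp; omega
      rw [show ((x :: y :: ys).filter (fun y => y.1 == x.1)) = x :: ((y :: ys).filter (fun y => y.1 == x.1)) from by simp [List.filter_cons], h1, List.nil_append]
    · rw [if_neg hb]
      by_cases hy : (y.1 == x.1) = true
      · simp only [List.filter_cons, hy, if_true]
        rw [ih hs.2, List.cons_append]
      · simp only [List.filter_cons, hy]
        exact ih hs.2

theorem pvIns_filter_ne (x : Int × Int) (s : List (Int × Int)) (hs : pvDesc s) (k : Int)
    (hk : k ≠ x.1) : (pvIns x s).filter (fun y => y.1 == k) = s.filter (fun y => y.1 == k) := by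
  induction s with
  | nil =>
    rw [pvIns_nil]
    simp only [List.filter_cons, List.filter_nil]
    rw [if_neg (by simp; omega)]
  | cons y ys ih =>
    unfold pvDesc at hs
    rw [List.pairwise_cons] at hs
    rw [pvIns_cons]
    by_cases hb : y.1 < x.1
    · rw [if_pos hb]
      simp only [List.filter_cons]
      rw [if_neg (by simp; omega)]
    · rw [if_neg hb]
      by_cases hy : (y.1 == k) = true
      · simp only [List.filter_cons, hy, if_true]
        rw [ih hs.2]
      · simp only [List.filter_cons, hy]
        exact ih hs.2

-- stability of A's sort: each key class keeps its original order
theorem pvSort_filter (l : List (Int × Int)) (k : Int) :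
    (pvSort l).filter (fun y => y.1 == k) = l.filter (fun y => y.1 == k) := by
  induction l using List.reverseRecOn with
  | nil => rfl
  | append_singleton t x ih =>
    rw [pvSort_append_singleton, List.filter_append]
    by_cases hk : k = x.1
    · subst hk
      rw [pvIns_filter_self x (pvSort t) (pvSort_desc t), ih]
      simp
    · rw [pvIns_filter_ne x (pvSort t) (pvSort_desc t) k hk, ih]
      simp only [List.filter_cons, List.filter_nil]
      rw [if_neg (by simp; omega), List.append_nil]

theorem split_at_first (P : List (Int × Int)) (p : Int × Int) :
    ∀ (U R V : List (Int × Int)), p ∉ P → p ∉ U → P ++ p :: R = U ++ p :: V → P = U ∧ R = V := by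
  induction P with
  | nil =>
    intro U R V _ hU he
    cases U with
    | nil => simpa using he
    | cons u us =>
      rw [List.nil_append, List.cons_append, List.cons_eq_cons] at he
      exact absurd (he.1 ▸ List.mem_cons_self) hU
  | cons a P' ih =>
    intro U R V hP hU he
    cases U with
    | nil =>
      rw [List.nil_append, List.cons_append, List.cons_eq_cons] at he
      exact absurd (he.1 ▸ List.mem_cons_self) hP
    | cons u us =>
      rw [List.cons_append, List.cons_append, List.cons_eq_cons] at he
      obtain ⟨rfl, he2⟩ := he
      obtain ⟨h1, h2⟩ := ih us R V (fun h => hP (List.mem_cons_of_mem _ h))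
        (fun h => hU (List.mem_cons_of_mem _ h)) he2
      exact ⟨by rw [h1], h2⟩

theorem fb_step (cl : Int) (t : List (Int × Int)) (x : Int × Int) :
    solveFindBest cl (t ++ [x]) =
      (if cl ≥ x.2 then
        match solveFindBest cl t with
        | none => some ((t.length : Int), x.1)
        | some b => if b.2 < x.1 then some ((t.length : Int), x.1) else some b
      else solveFindBest cl t) := by
  unfold solveFindBest
  rw [PySem.List.enumerate_append, List.foldl_append]
  simp only [PySem.List.enumerate_cons, PySem.List.enumerate_nil, List.foldl_cons,
    List.foldl_nil, zero_add]
  by_cases hx : cl ≥ x.2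
  · rw [if_pos hx, if_pos hx]
    cases (PySem.List.enumerate t 0).foldl _ (none : Option (Int × Int)) <;> rfl
  · rw [if_neg hx, if_neg hx]

-- characterization of B's inner scan
theorem fb_spec (cl : Int) (l : List (Int × Int)) :
    (solveFindBest cl l = none ∧ ∀ p ∈ l, ¬ p.2 ≤ cl) ∨
    (∃ j : Nat, ∃ hj : j < l.length, solveFindBest cl l = some ((j : Int), l[j].1) ∧
      l[j].2 ≤ cl ∧
      (∀ i, (hi : i < l.length) → l[i].2 ≤ cl → l[i].1 ≤ l[j].1) ∧
      (∀ i, (hi : i < j) → l[i].2 ≤ cl → l[i].1 < l[j].1)) := by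
  induction l using List.reverseRecOn with
  | nil => exact Or.inl ⟨by simp [solveFindBest, PySem.List.enumerate], by simp⟩
  | append_singleton t x ih =>
    rcases ih with ⟨hnone, hall⟩ | ⟨j, hj, hsome, haff, hmax, hstrict⟩
    · by_cases hx : cl ≥ x.2
      · right
        refine ⟨t.length, by simp, ?_, ?_, ?_, ?_⟩
        · rw [List.getElem_concat_length rfl, fb_step, if_pos hx, hnone]
        · rw [List.getElem_concat_length rfl]; exact hx
        · intro i hi haffi
          rw [List.getElem_concat_length rfl]
          rcases Nat.lt_or_ge i t.length with h' | h'
          · rw [List.getElem_append_left h'] at haffi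
            exact absurd haffi (hall _ (List.getElem_mem _))
          · have hit : i = t.length := by simp at hi; omega
            subst hit
            rw [List.getElem_concat_length rfl]
        · intro i hi haffi
          rw [List.getElem_append_left hi] at haffi
          exact absurd haffi (hall _ (List.getElem_mem _))
      · left
        refine ⟨by rw [fb_step, if_neg hx, hnone], ?_⟩
        intro p hp
        rcases List.mem_append.1 hp with h' | h'
        · exact hall p h'
        · have : p = x := by simpa using h'
          subst this; exact hx
    · have hj' : j < (t ++ [x]).length := by simp; omega
      have hgetj : (t ++ [x])[j]'hj' = t[j] := List.getElem_append_left hj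
      by_cases hx : cl ≥ x.2
      · by_cases hgt : t[j].1 < x.1
        · right
          refine ⟨t.length, by simp, ?_, ?_, ?_, ?_⟩
          · rw [List.getElem_concat_length rfl, fb_step, if_pos hx, hsome]
            simp [hgt]
          · rw [List.getElem_concat_length rfl]; exact hx
          · intro i hi haffi
            rw [List.getElem_concat_length rfl]
            rcases Nat.lt_or_ge i t.length with h' | h'
            · rw [List.getElem_append_left h'] at haffi ⊢
              exact le_of_lt (lt_of_le_of_lt (hmax i h' haffi) hgt)
            · have hit : i = t.length := by simp at hi; omega
              subst hit
              rw [List.getElem_concat_length rfl]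
          · intro i hi haffi
            rw [List.getElem_append_left hi] at haffi ⊢
            rw [List.getElem_concat_length rfl]
            exact lt_of_le_of_lt (hmax i hi haffi) hgt
        · right
          refine ⟨j, hj', ?_, ?_, ?_, ?_⟩
          · rw [hgetj, fb_step, if_pos hx, hsome]
            simp [hgt]
          · rw [hgetj]; exact haff
          · intro i hi haffi
            rw [hgetj]
            rcases Nat.lt_or_ge i t.length with h' | h'
            · rw [List.getElem_append_left h'] at haffi ⊢
              exact hmax i h' haffi
            · have hit : i = t.length := by simp at hi; omega
              subst hit
              rw [List.getElem_concat_length rfl] at haffi ⊢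
              omega
          · intro i hi haffi
            rw [List.getElem_append_left (lt_trans hi hj)] at haffi ⊢
            rw [hgetj]
            exact hstrict i hi haffi
      · right
        refine ⟨j, hj', ?_, ?_, ?_, ?_⟩
        · rw [hgetj, fb_step, if_neg hx, hsome]
        · rw [hgetj]; exact haff
        · intro i hi haffi
          rw [hgetj]
          rcases Nat.lt_or_ge i t.length with h' | h'
          · rw [List.getElem_append_left h'] at haffi ⊢
            exact hmax i h' haffi
          · have hit : i = t.length := by simp at hi; omega
            subst hit
            rw [List.getElem_concat_length rfl] at haffi
            exact absurd haffi hx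
        · intro i hi haffi
          rw [List.getElem_append_left (lt_trans hi hj)] at haffi ⊢
          rw [hgetj]
          exact hstrict i hi haffi

-- characterization of A's scan from index i
theorem loopA_scan (np cl : Int) (lst : List (Int × Int)) (hnp : 0 < np) :
    ∀ (k i : Nat), lst.length - i = k →
    solveLoopA np cl lst i =
      (match (lst.drop i).find? (fun p => decide (cl ≥ p.2)) with
       | none => cl
       | some p =>
         match PySem.List.remove? lst p with
         | none => cl
         | some lst' => if 0 = lst'.length then cl + p.1
                        else solveLoopA (np - 1) (cl + p.1) lst' 0) := by
  intro k
  induction k with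
  | zero =>
    intro i hik
    have hle : lst.length ≤ i := by omega
    have hg : PySem.List.pyGet? lst (i : Int) = none := by
      rw [PySem.List.pyGet?_natCast]; exact List.getElem?_eq_none hle
    rw [solveLoopA, if_pos hnp]
    split
    · rw [List.drop_of_length_le hle, List.find?_nil]
    · rename_i p heq
      rw [hg] at heq; cases heq
  | succ k ih =>
    intro i hik
    have hi : i < lst.length := by omega
    have hg : PySem.List.pyGet? lst (i : Int) = some lst[i] := by
      rw [PySem.List.pyGet?_natCast]; exact List.getElem?_eq_getElem hi
    rw [solveLoopA, if_pos hnp]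
    split
    · rename_i heq; rw [hg] at heq; cases heq
    · rename_i p heq
      rw [hg] at heq
      injection heq with heq'
      subst heq'
      rw [List.drop_eq_getElem_cons hi]
      by_cases hcl : cl ≥ lst[i].2
      · rw [if_pos hcl, List.find?_cons_of_pos (by simpa using hcl)]
        dsimp only
        split
        · rename_i h2; rw [h2]
        · rename_i lst' h2; rw [h2]
      · rw [if_neg hcl, List.find?_cons_of_neg (by simpa using hcl)]
        by_cases hend : i + 1 = lst.length
        · rw [if_pos hend,
            show lst.drop (i + 1) = [] from List.drop_of_length_le (by omega), List.find?_nil]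
        · rw [if_neg hend]
          exact ih (i + 1) (by omega)

-- the first affordable element of the sorted list is the earliest maximal affordable project
theorem sorted_find_sel (cl : Int) (l : List (Int × Int)) (p : Int × Int)
    (h : (pvSort l).find? (fun q => decide (cl ≥ q.2)) = some p) :
    ∃ j : Nat, PySem.List.index? l p = some j ∧ ∃ hj : j < l.length, l[j] = p ∧ cl ≥ p.2 ∧
      (∀ i, (hi : i < l.length) → l[i].2 ≤ cl → l[i].1 ≤ p.1) ∧
      (∀ i, (hi : i < j) → l[i].2 ≤ cl → l[i].1 < p.1) := by
  obtain ⟨hpred, U, V, hsplit, hU⟩ := List.find?_eq_some_iff_append.1 h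
  have hpredP : cl ≥ p.2 := by simpa using hpred
  have hpmemS : p ∈ pvSort l := by
    rw [hsplit]; exact List.mem_append_right _ List.mem_cons_self
  have hpmem : p ∈ l := (mem_pvSort l p).1 hpmemS
  obtain ⟨j, hidx⟩ : ∃ j, PySem.List.index? l p = some j := by
    rw [← Option.isSome_iff_exists]
    exact (PySem.List.index?_isSome_iff l p).2 hpmem
  obtain ⟨pre, suf, hl, hlen, hpre⟩ := (PySem.List.index?_eq_some_iff l p j).1 hidx
  obtain ⟨hjlt, hgetj, -⟩ := PySem.List.getElem_of_index?_eq_some hidx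
  have hPW := pvSort_desc l
  rw [hsplit] at hPW
  unfold pvDesc at hPW
  rw [List.pairwise_append] at hPW
  have hVle : ∀ v ∈ V, v.1 ≤ p.1 := (List.pairwise_cons.1 hPW.2.1).1
  have hUnp : ∀ u ∈ U, ¬ cl ≥ u.2 := by
    intro u hu
    have := hU u hu
    simpa using this
  have hmax : ∀ i, (hi : i < l.length) → l[i].2 ≤ cl → l[i].1 ≤ p.1 := by
    intro i hi haffi
    have hmem : l[i] ∈ pvSort l := (mem_pvSort _ _).2 (List.getElem_mem _)
    rw [hsplit] at hmem
    rcases List.mem_append.1 hmem with hUq | hq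
    · exact absurd haffi (hUnp _ hUq)
    · rcases List.mem_cons.1 hq with he | hV
      · rw [he]
      · exact hVle _ hV
  refine ⟨j, hidx, hjlt, hgetj, hpredP, hmax, ?_⟩
  intro i hij haffi
  have hil : i < l.length := lt_trans hij hjlt
  by_contra hnlt
  have heq1 : l[i].1 = p.1 := le_antisymm (hmax i hil haffi) (by omega)
  have hqpre : l[i] ∈ pre := by
    have hipre : i < pre.length := by omega
    have : l[i] = pre[i]'hipre := by
      subst hl
      exact List.getElem_append_left hipre
    rw [this]
    exact List.getElem_mem _
  have hfil := pvSort_filter l p.1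
  rw [hsplit, hl, List.filter_append, List.filter_append] at hfil
  simp only [List.filter_cons, beq_self_eq_true, if_true] at hfil
  have hpU : p ∉ U := fun hm => (hUnp p hm) hpredP
  have hsplit2 := split_at_first (U.filter (fun y => y.1 == p.1)) p
    (pre.filter (fun y => y.1 == p.1)) _ _
    (fun hm => hpU (List.mem_of_mem_filter hm))
    (fun hm => hpre (List.mem_of_mem_filter hm)) hfil
  have hqU : l[i] ∈ U := by
    have : l[i] ∈ pre.filter (fun y => y.1 == p.1) :=
      List.mem_filter.2 ⟨hqpre, by simpa using heq1⟩
    rw [← hsplit2.1] at this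
    exact List.mem_of_mem_filter this
  exact (hUnp _ hqU) haffi

theorem loopB_nil (np cl : Int) : solveLoopB np cl [] = cl := by
  rw [solveLoopB]
  simp [solveFindBest, PySem.List.enumerate]

theorem main_loops_eq (n : Nat) : ∀ (l : List (Int × Int)), l.length ≤ n → ∀ (np cl : Int),
    solveLoopA np cl (pvSort l) 0 = solveLoopB np cl l := by
  induction n with
  | zero =>
    intro l hl np cl
    have hnil : l = [] := List.eq_nil_of_length_eq_zero (by omega)
    subst hnil
    rw [loopB_nil, show pvSort [] = [] from rfl, solveLoopA]
    by_cases hnp : np > 0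
    · rw [if_pos hnp]
      split
      · rfl
      · rename_i p heq
        simp [PySem.List.pyGet?] at heq
    · rw [if_neg hnp]
  | succ n ih =>
    intro l hl np cl
    by_cases hnp : np > 0
    case neg => rw [solveLoopA, if_neg hnp, solveLoopB, if_neg hnp]
    rw [loopA_scan np cl (pvSort l) hnp ((pvSort l).length) 0 (by omega), List.drop_zero,
      solveLoopB, if_pos hnp]
    cases hfind : (pvSort l).find? (fun q => decide (cl ≥ q.2)) with
    | none =>
      rcases fb_spec cl l with ⟨hnone, -⟩ | ⟨j, hj, hsome, haff, -, -⟩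
      · rw [hnone]
      · have := List.find?_eq_none.1 hfind l[j] ((mem_pvSort _ _).2 (List.getElem_mem _))
        exact absurd haff (by simpa using this)
    | some p =>
      obtain ⟨j, hidx, hjlt, hgetj, hpredP, hmax, hstrict⟩ := sorted_find_sel cl l p hfind
      have hpl : p ∈ l := hgetj ▸ List.getElem_mem hjlt
      rcases fb_spec cl l with ⟨hnone, hall⟩ | ⟨j', hj', hsome, haff, hmax', hstrict'⟩
      · exact absurd (show p.2 ≤ cl from hpredP) (hall p hpl)
      · have hjj : j' = j := by
          by_contra hne
          rcases Nat.lt_or_ge j' j with hlt | hge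
          · have h1 := hstrict j' hlt haff
            have h2 := hmax' j hjlt (by rw [hgetj]; exact hpredP)
            rw [hgetj] at h2
            omega
          · have hlt : j < j' := by omega
            have h1 := hstrict' j hlt (by rw [hgetj]; exact hpredP)
            have h2 := hmax j' hj' haff
            rw [hgetj] at h1
            omega
        subst hjj
        rw [hsome]
        dsimp only
        rw [PySem.List.pop?_natCast l j' hj']
        dsimp only
        have hrm := PySem.List.remove?_eq_some_erase (pvSort l) p ((mem_pvSort l p).2 hpl)
        rw [hrm]
        dsimp only
        rw [pvSort_erase l p hpl]
        have her : l.erase p = l.eraseIdx j' := by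
          rw [List.erase_eq_eraseIdx, ← PySem.List.index?_eq_idxOf?, hidx]
        by_cases hlen0 : 0 = (pvSort (l.erase p)).length
        · rw [if_pos hlen0]
          have hnil2 : l.erase p = [] := by
            have h1 : pvSort (l.erase p) = [] := List.length_eq_zero_iff.1 hlen0.symm
            exact (PySem.List.sorted_eq_nil_iff _ _ _).1 h1
          rw [hgetj, ← her, hnil2, loopB_nil]
        · rw [if_neg hlen0, hgetj, ← her]
          have hlen : (l.erase p).length ≤ n := by
            have := List.length_erase_of_mem hpl
            have := List.length_pos_of_mem hpl
            omega
          exact ih (l.erase p) hlen (np - 1) (cl + p.1)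

theorem pairing_eq_zip (inc mn : List Int) (h : inc.length ≤ mn.length) :
    (List.range inc.length).map
      (fun (i : Nat) => (PySem.List.pyGetD inc (i : Int) 0, PySem.List.pyGetD mn (i : Int) 0)) =
    inc.zip mn := by
  apply List.ext_getElem
  · simp; omega
  · intro i h1 h2
    have hi : i < inc.length := by simpa using h1
    simp only [List.getElem_map, List.getElem_range, List.getElem_zip,
      PySem.List.pyGetD_natCast]
    rw [List.getD_eq_getElem inc 0 hi, List.getD_eq_getElem mn 0 (by omega)]

-- ===== VERDICT (by name: the statement is the Claim_ definition above) =====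
theorem solve_spec : Claim_equal_solve := by
  intro np cl inc mn _ hpre
  unfold Pre_solve at hpre
  unfold Spec_solve solve solve_alt
  rw [pairing_eq_zip inc mn hpre]
  exact main_loops_eq (inc.zip mn).length _ le_rfl np cl
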